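-- pv_equiv track=rewrite | github.com/mean71/codingtest | 프로그래머스/1/92334. 신고 결과 받기/신고 결과 받기.py | solution
-- ===== SOURCE A (Python) =====
-- def solution(id_list, report, k):
--     id_list = {key: [set(), 0] for key in id_list}
--
--     for p1,p2 in map(lambda s:s.split(), report):
--         id_list[p2][0].add(p1)
--
--     for list_id in id_list.values():
--         if len(list_id[0]) >= k:
--             for key in list_id[0]:
--                 id_list[key][1] += 1
--
--     return [user[1] for user in id_list.values()]
-- ===== SOURCE B (Python) =====
-- def solution(id_list, report, k):
--     pairs = [r.split() for r in report]
--     def reporters(u):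
--         return {p[0] for p in pairs if p[1] == u}
--     ids = list(dict.fromkeys(id_list))
--     big = [reporters(u) for u in ids if len(reporters(u)) >= k]
--     return [sum(1 for s in big if i in s) for i in ids]
-- ===== Notes on version B (the rewrite author's own statement) =====
-- stated objective: alternative
-- what changed: B inverts A's event-driven accumulation: instead of building a mutable dict of per-user reporter sets and crediting each reporter by incrementing counters while walking set members, B computes each output entry directly - it recomputes the distinct-reporter set of each id by scanning the split report pairs, keeps the sets that reached k ('big'), and answers per id with membership counts over those sets, with no mutable counters or dict at all.
import Mathlib
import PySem

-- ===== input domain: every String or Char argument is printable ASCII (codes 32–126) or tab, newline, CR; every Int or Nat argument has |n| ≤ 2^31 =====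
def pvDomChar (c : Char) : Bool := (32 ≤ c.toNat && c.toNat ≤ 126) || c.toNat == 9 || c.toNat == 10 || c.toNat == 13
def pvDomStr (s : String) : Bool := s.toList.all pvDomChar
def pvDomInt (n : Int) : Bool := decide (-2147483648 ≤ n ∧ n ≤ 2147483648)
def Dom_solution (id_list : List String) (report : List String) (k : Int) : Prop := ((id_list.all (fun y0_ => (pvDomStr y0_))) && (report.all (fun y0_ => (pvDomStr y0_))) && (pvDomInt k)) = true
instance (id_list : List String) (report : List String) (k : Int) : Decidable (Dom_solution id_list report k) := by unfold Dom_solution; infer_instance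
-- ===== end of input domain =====

-- B inverts A's event-driven accumulation: no mutable dict or counters — each output entry is
-- computed directly, by membership counts of the id over the reporter sets that reached k
-- (objective: alternative decomposition; equal return values on all inputs where A returns).

-- ===== PORT A =====
def solution (id_list : List String) (report : List String) (k : Int) : List Int :=
  -- id_list = {key: [set(), 0] for key in id_list}
  let d0 : PySem.Dict String (PySem.Set String × Int) :=
    id_list.foldl (fun d key => d.insert key (PySem.Set.empty, 0)) PySem.Dict.empty
  -- for p1,p2 in map(lambda s:s.split(), report): id_list[p2][0].add(p1)
  -- (≠ 2 tokens → ValueError; p2 not a key → KeyError: both excluded by Pre_)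
  let d1 : PySem.Dict String (PySem.Set String × Int) :=
    report.foldl (fun d s =>
      match PySem.Str.split₀ s with
      | [p1, p2] => d.modify p2 (PySem.Set.empty, 0) (fun v => (PySem.Set.add v.1 p1, v.2))
      | _ => d) d0
  -- for list_id in id_list.values(): if len(list_id[0]) >= k: for key in list_id[0]: id_list[key][1] += 1
  -- (the loop mutates only the counts, never the sets the iteration reads; counts are
  --  order-independent sums, so folding over the set's stored order is exact;
  --  key not a key of the dict → KeyError: excluded by Pre_)
  let d2 : PySem.Dict String (PySem.Set String × Int) :=
    d1.items.foldl (fun d kv =>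
      if k ≤ (kv.2.1.length : Int) then
        kv.2.1.foldl (fun d' key => d'.modify key (PySem.Set.empty, 0) (fun v => (v.1, v.2 + 1))) d
      else d) d1
  -- return [user[1] for user in id_list.values()]
  d2.values.map (fun v => v.2)

-- ===== PORT B =====
-- reporters(u) = {p[0] for p in pairs if p[1] == u}   (p[1] of a short pair → IndexError: excluded by Pre_)
def pvReporters (pairs : List (List String)) (u : String) : PySem.Set String :=
  PySem.Set.ofList (pairs.filterMap (fun p =>
    match PySem.List.pyGet? p 1, PySem.List.pyGet? p 0 with
    | some p2, some p1 => if p2 == u then some p1 else none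
    | _, _ => none))

def solution_alt (id_list : List String) (report : List String) (k : Int) : List Int :=
  -- pairs = [r.split() for r in report]
  let pairs : List (List String) := report.map (fun r => PySem.Str.split₀ r)
  -- ids = list(dict.fromkeys(id_list))
  let ids : List String := PySem.List.dedup id_list
  -- big = [reporters(u) for u in ids if len(reporters(u)) >= k]
  let big : List (PySem.Set String) :=
    (ids.filter (fun u => decide (k ≤ ((pvReporters pairs u).length : Int)))).map
      (fun u => pvReporters pairs u)
  -- return [sum(1 for s in big if i in s) for i in ids]
  ids.map (fun i => ((big.countP (fun s => decide (i ∈ s))) : Int))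

-- ===== PRECONDITION & SPEC =====
-- Pre_solution is exactly the set of inputs where A returns normally: every report line must
-- split into exactly two tokens, the reported user must be an id (else KeyError in the first
-- loop), and an unknown reporter is tolerated by A only while the user he reported has fewer
-- than k distinct reporters (otherwise the increment loop raises KeyError on him).
def Pre_solution (id_list : List String) (report : List String) (k : Int) : Prop :=
  ∀ s ∈ report,
    (PySem.Str.split₀ s).length = 2 ∧
    (PySem.Str.split₀ s).getD 1 "" ∈ id_list ∧
    ((PySem.Str.split₀ s).getD 0 "" ∈ id_list ∨
      ((PySem.Set.ofList (((report.map PySem.Str.split₀).filter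
          (fun w => w.getD 1 "" == (PySem.Str.split₀ s).getD 1 "")).map
          (fun w => w.getD 0 ""))).length : Int) < k)
instance (id_list : List String) (report : List String) (k : Int) : Decidable (Pre_solution id_list report k) := by unfold Pre_solution; infer_instance

def pvWitness_solution : List String × List String × Int :=
  (["muzi", "frodo", "apeach", "neo"],
   ["muzi frodo", "apeach frodo", "frodo neo", "muzi neo", "apeach muzi"], 2)

def Spec_solution (id_list : List String) (report : List String) (k : Int) (out : List Int) : Prop := out = solution_alt id_list report k
instance (id_list : List String) (report : List String) (k : Int) (out : List Int) : Decidable (Spec_solution id_list report k out) := by unfold Spec_solution; infer_instance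

-- ===== CLAIM (what is proved, stated in full; the proofs are below) =====
def Claim_equal_solution : Prop := ∀ (id_list : List String) (report : List String) (k : Int), Dom_solution id_list report k → Pre_solution id_list report k → Spec_solution id_list report k (solution id_list report k)


-- abbreviations used only by the proofs
def pvFst (w : List String) : String := w.getD 0 ""
def pvSnd (w : List String) : String := w.getD 1 ""
def pvRS (P : List (List String)) (u : String) : PySem.Set String :=
  PySem.Set.ofList ((P.filter (fun w => pvSnd w == u)).map pvFst)

theorem pv_len2 (w : List String) (h : w.length = 2) : w = [pvFst w, pvSnd w] := by
  match w, h with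
  | [a, b], _ => rfl

theorem pv_update_of_subset (s : PySem.Set String) (xs : List String)
    (h : ∀ x ∈ xs, x ∈ s) : PySem.Set.update s xs = s := by
  induction xs generalizing s with
  | nil => rfl
  | cons x xs ih =>
    rw [PySem.Set.update_cons, PySem.Set.add_of_mem (h x (by simp))]
    exact ih s (fun y hy => h y (by simp [hy]))

theorem pv_getD_foldl_insert_const {ν : Type} (l : List String) (c : ν)
    (d : PySem.Dict String ν) (h : ∀ x, d.getD x c = c) (u : String) :
    (l.foldl (fun d key => d.insert key c) d).getD u c = c := by
  induction l generalizing d with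
  | nil => exact h u
  | cons x l ih =>
    refine ih (d.insert x c) (fun y => ?_)
    rw [PySem.Dict.getD_insert]
    split <;> simp [h]

-- A's first loop, rewritten over the split lists
theorem pv_A_matchfold (report : List String) (d0 : PySem.Dict String (PySem.Set String × Int))
    (hlen : ∀ s ∈ report, (PySem.Str.split₀ s).length = 2) :
    report.foldl (fun d s =>
      match PySem.Str.split₀ s with
      | [p1, p2] => d.modify p2 (PySem.Set.empty, 0) (fun v => (PySem.Set.add v.1 p1, v.2))
      | _ => d) d0
    = (report.map PySem.Str.split₀).foldl (fun d w =>
        d.modify (pvSnd w) (PySem.Set.empty, 0) (fun v => (PySem.Set.add v.1 (pvFst w), v.2))) d0 := by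
  rw [List.foldl_map]
  apply PySem.List.foldl_congr_mem
  intro d s hs
  rw [pv_len2 _ (hlen s hs)]; simp [pvFst, pvSnd]

-- getD through A's reporter-collecting loop
theorem pv_A_getD_d1 (P : List (List String)) (d : PySem.Dict String (PySem.Set String × Int))
    (u : String) :
    (P.foldl (fun d w =>
        d.modify (pvSnd w) (PySem.Set.empty, 0) (fun v => (PySem.Set.add v.1 (pvFst w), v.2))) d).getD
        u (PySem.Set.empty, 0)
    = (P.foldl (fun s w => if u = pvSnd w then PySem.Set.add s (pvFst w) else s)
        (d.getD u (PySem.Set.empty, 0)).1,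
       (d.getD u (PySem.Set.empty, 0)).2) := by
  induction P generalizing d with
  | nil => rfl
  | cons w P ih =>
    simp only [List.foldl_cons, ih, PySem.Dict.getD_modify]
    by_cases h : u = pvSnd w <;> simp [h]

-- the reporter set collected by A's loop is pvRS
theorem pv_A_RS (P : List (List String)) (u : String) :
    P.foldl (fun s w => if u = pvSnd w then PySem.Set.add s (pvFst w) else s) PySem.Set.empty
    = pvRS P u := by
  rw [PySem.List.foldl_ite_eq_foldl_filter, ← PySem.Set.update_map_eq_foldl_add,
    PySem.Set.update_empty, pvRS]
  congr 2
  apply List.filter_congr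
  intro w _
  rw [Bool.eq_iff_iff]
  simp only [beq_iff_eq, decide_eq_true_eq]
  exact eq_comm

-- getD through A's inner increment loop
theorem pv_A_getD_incr (s : List String) (d : PySem.Dict String (PySem.Set String × Int))
    (u : String) :
    (s.foldl (fun d' key => d'.modify key (PySem.Set.empty, 0) (fun v => (v.1, v.2 + 1))) d).getD
        u (PySem.Set.empty, 0)
    = ((d.getD u (PySem.Set.empty, 0)).1,
       (d.getD u (PySem.Set.empty, 0)).2 + (s.count u : Int)) := by
  induction s generalizing d with
  | nil => simp
  | cons x s ih =>
    simp only [List.foldl_cons, ih, PySem.Dict.getD_modify, List.count_cons]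
    by_cases h : u = x
    · subst h; simp; ring
    · simp [h, Ne.symm h]

-- getD through A's outer counting loop
theorem pv_A_getD_outer (k : Int) (Q : List (String × (PySem.Set String × Int)))
    (d : PySem.Dict String (PySem.Set String × Int)) (u : String) :
    (Q.foldl (fun d kv =>
        if k ≤ (kv.2.1.length : Int) then
          kv.2.1.foldl (fun d' key => d'.modify key (PySem.Set.empty, 0) (fun v => (v.1, v.2 + 1))) d
        else d) d).getD u (PySem.Set.empty, 0)
    = ((d.getD u (PySem.Set.empty, 0)).1,
       (d.getD u (PySem.Set.empty, 0)).2 +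
         ((Q.filter (fun kv => decide (k ≤ (kv.2.1.length : Int)))).map
           (fun kv => (kv.2.1.count u : Int))).sum) := by
  induction Q generalizing d with
  | nil => simp
  | cons kv Q ih =>
    simp only [List.foldl_cons, List.filter_cons]
    by_cases h : k ≤ (kv.2.1.length : Int)
    · rw [if_pos h, ih, pv_A_getD_incr, if_pos (decide_eq_true h)]
      simp only [List.map_cons, List.sum_cons, Prod.mk.injEq]
      exact ⟨trivial, by ring⟩
    · rw [if_neg h, ih, if_neg (by simp [h])]

-- keys are unchanged through A's inner increment loop when its elements are keys
theorem pv_A_keys_incr (s : List String) (d : PySem.Dict String (PySem.Set String × Int))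
    (h : ∀ x ∈ s, x ∈ d.keys) :
    (s.foldl (fun d' key => d'.modify key (PySem.Set.empty, 0) (fun v => (v.1, v.2 + 1))) d).keys
      = d.keys := by
  rw [PySem.Dict.keys_foldl_modify_key (l := s) (key := fun x => x)
    (d0 := ((PySem.Set.empty, 0) : PySem.Set String × Int))
    (f := fun _ _ => (fun v => (v.1, v.2 + 1))) (d := d)]
  rw [show List.map (fun x => x) s = s from List.map_id s]
  exact pv_update_of_subset _ _ h

-- keys are unchanged through A's outer loop
theorem pv_A_keys_outer (k : Int) (Q : List (String × (PySem.Set String × Int)))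
    (d : PySem.Dict String (PySem.Set String × Int))
    (h : ∀ kv ∈ Q, k ≤ (kv.2.1.length : Int) → ∀ x ∈ kv.2.1, x ∈ d.keys) :
    (Q.foldl (fun d kv =>
        if k ≤ (kv.2.1.length : Int) then
          kv.2.1.foldl (fun d' key => d'.modify key (PySem.Set.empty, 0) (fun v => (v.1, v.2 + 1))) d
        else d) d).keys = d.keys := by
  induction Q generalizing d with
  | nil => rfl
  | cons kv Q ih =>
    simp only [List.foldl_cons]
    by_cases hk : k ≤ (kv.2.1.length : Int)
    · rw [if_pos hk]
      have hkeys : ∀ x ∈ kv.2.1, x ∈ d.keys := h kv (by simp) hk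
      rw [ih _ (fun kv' h' hk' x hx => by
        rw [pv_A_keys_incr _ _ hkeys]; exact h kv' (by simp [h']) hk' x hx)]
      exact pv_A_keys_incr _ _ hkeys
    · rw [if_neg hk]
      exact ih _ (fun kv' h' hk' x hx => h kv' (by simp [h']) hk' x hx)

-- staged views of A's port
def pvD0 (id_list : List String) : PySem.Dict String (PySem.Set String × Int) :=
  id_list.foldl (fun d key => d.insert key (PySem.Set.empty, 0)) PySem.Dict.empty
def pvD1 (id_list report : List String) : PySem.Dict String (PySem.Set String × Int) :=
  report.foldl (fun d s =>
    match PySem.Str.split₀ s with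
    | [p1, p2] => d.modify p2 (PySem.Set.empty, 0) (fun v => (PySem.Set.add v.1 p1, v.2))
    | _ => d) (pvD0 id_list)
def pvD2 (id_list report : List String) (k : Int) : PySem.Dict String (PySem.Set String × Int) :=
  (pvD1 id_list report).items.foldl (fun d kv =>
    if k ≤ (kv.2.1.length : Int) then
      kv.2.1.foldl (fun d' key => d'.modify key (PySem.Set.empty, 0) (fun v => (v.1, v.2 + 1))) d
    else d) (pvD1 id_list report)

theorem pv_solution_stages (id_list report : List String) (k : Int) :
    solution id_list report k = (pvD2 id_list report k).values.map (fun v => v.2) := rfl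

theorem pv_D0_keys (id_list : List String) : (pvD0 id_list).keys = PySem.Set.ofList id_list := by
  rw [pvD0, PySem.Dict.keys_foldl_insert (f := fun _ _ => (PySem.Set.empty, 0))]
  simp [PySem.Dict.keys_empty]
  rfl

theorem pv_D0_getD (id_list : List String) (u : String) :
    (pvD0 id_list).getD u (PySem.Set.empty, 0) = (PySem.Set.empty, 0) :=
  pv_getD_foldl_insert_const _ _ _ (fun _ => PySem.Dict.getD_empty _ _) u

theorem pv_mem_pvRS (P : List (List String)) (hP2 : ∀ w ∈ P, w.length = 2) (x u : String) :
    x ∈ pvRS P u ↔ [x, u] ∈ P := by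
  rw [pvRS, PySem.Set.mem_ofList, List.mem_map]
  constructor
  · rintro ⟨w, hw, rfl⟩
    rw [List.mem_filter] at hw
    have h2 := pv_len2 w (hP2 w hw.1)
    have : pvSnd w = u := by simpa using hw.2
    rw [← this, ← h2]; exact hw.1
  · intro h
    refine ⟨[x, u], List.mem_filter.2 ⟨h, by simp [pvSnd]⟩, by simp [pvFst]⟩

theorem pv_D1_getD (id_list report : List String)
    (hlen : ∀ s ∈ report, (PySem.Str.split₀ s).length = 2) (u : String) :
    (pvD1 id_list report).getD u (PySem.Set.empty, 0)
      = (pvRS (report.map PySem.Str.split₀) u, 0) := by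
  rw [pvD1, pv_A_matchfold report _ hlen, pv_A_getD_d1, pv_D0_getD]
  simp
  exact pv_A_RS _ _

theorem pv_D1_keys (id_list report : List String)
    (hlen : ∀ s ∈ report, (PySem.Str.split₀ s).length = 2)
    (hsnd : ∀ s ∈ report, (PySem.Str.split₀ s).getD 1 "" ∈ id_list) :
    (pvD1 id_list report).keys = PySem.Set.ofList id_list := by
  rw [pvD1, pv_A_matchfold report _ hlen,
    PySem.Dict.keys_foldl_modify_key (key := pvSnd)
      (f := fun _ w => (fun v => (PySem.Set.add v.1 (pvFst w), v.2))), pv_D0_keys]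
  refine pv_update_of_subset _ _ (fun x hx => ?_)
  obtain ⟨w, hw, rfl⟩ := List.mem_map.1 hx
  obtain ⟨s, hs, rfl⟩ := List.mem_map.1 hw
  exact (PySem.Set.mem_ofList _ _).2 (hsnd s hs)

theorem pv_D1_nodup (id_list report : List String)
    (hlen : ∀ s ∈ report, (PySem.Str.split₀ s).length = 2)
    (hsnd : ∀ s ∈ report, (PySem.Str.split₀ s).getD 1 "" ∈ id_list) :
    (pvD1 id_list report).keys.Nodup := by
  rw [pv_D1_keys id_list report hlen hsnd]; exact PySem.Set.nodup_ofList _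

-- A's closed form
theorem pv_solution_eq (id_list report : List String) (k : Int)
    (hPre : Pre_solution id_list report k) :
    solution id_list report k
    = (PySem.Set.ofList id_list).map (fun key =>
        ((PySem.Set.ofList id_list).countP (fun u =>
            decide (key ∈ pvRS (report.map PySem.Str.split₀) u) &&
            decide (k ≤ ((pvRS (report.map PySem.Str.split₀) u).length : Int))) : Int)) := by
  have hlen : ∀ s ∈ report, (PySem.Str.split₀ s).length = 2 := fun s hs => (hPre s hs).1
  have hsnd : ∀ s ∈ report, (PySem.Str.split₀ s).getD 1 "" ∈ id_list := fun s hs => (hPre s hs).2.1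
  have hP2 : ∀ w ∈ report.map PySem.Str.split₀, w.length = 2 := by
    intro w hw; obtain ⟨s, hs, rfl⟩ := List.mem_map.1 hw; exact hlen s hs
  have hfst : ∀ w ∈ report.map PySem.Str.split₀,
      k ≤ ((pvRS (report.map PySem.Str.split₀) (pvSnd w)).length : Int) → pvFst w ∈ id_list := by
    intro w hw hk
    obtain ⟨s, hs, rfl⟩ := List.mem_map.1 hw
    rcases (hPre s hs).2.2 with h | h
    · exact h
    · exact absurd hk (by simpa [pvRS, pvFst, pvSnd] using not_le.2 h)
  -- items of d1
  have hitems : (pvD1 id_list report).items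
      = (PySem.Set.ofList id_list).map
          (fun u => (u, (pvRS (report.map PySem.Str.split₀) u, 0))) := by
    rw [PySem.Dict.items_eq_map_keys _ (pv_D1_nodup id_list report hlen hsnd)
      ((PySem.Set.empty, 0) : PySem.Set String × Int),
      pv_D1_keys id_list report hlen hsnd]
    exact List.map_congr_left (fun u _ => by rw [pv_D1_getD id_list report hlen u])
  -- keys of d2
  have hK2 : (pvD2 id_list report k).keys = PySem.Set.ofList id_list := by
    rw [pvD2, pv_A_keys_outer, pv_D1_keys id_list report hlen hsnd]
    intro kv hkv hk x hx
    rw [hitems] at hkv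
    obtain ⟨u, _, rfl⟩ := List.mem_map.1 hkv
    simp only at hx hk
    have hxu := (pv_mem_pvRS _ hP2 x u).1 hx
    have : pvFst [x, u] ∈ id_list := hfst [x, u] hxu (by simpa [pvSnd] using hk)
    rw [pv_D1_keys id_list report hlen hsnd]
    exact (PySem.Set.mem_ofList _ _).2 (by simpa [pvFst] using this)
  have hK2nodup : (pvD2 id_list report k).keys.Nodup := by
    rw [hK2]; exact PySem.Set.nodup_ofList _
  -- assemble
  rw [pv_solution_stages, PySem.Dict.values_eq_map_keys _ hK2nodup
    ((PySem.Set.empty, 0) : PySem.Set String × Int), hK2, List.map_map]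
  refine List.map_congr_left (fun key hkey => ?_)
  have hgetD2 : (pvD2 id_list report k).getD key (PySem.Set.empty, 0)
      = ((pvRS (report.map PySem.Str.split₀) key, 0).1,
         (0 : Int) +
           (((pvD1 id_list report).items.filter
               (fun kv => decide (k ≤ (kv.2.1.length : Int)))).map
             (fun kv => (kv.2.1.count key : Int))).sum) := by
    rw [pvD2, pv_A_getD_outer, pv_D1_getD id_list report hlen key]
  simp only [Function.comp_def, hgetD2, hitems, List.filter_map, List.map_map]
  rw [zero_add]
  rw [List.map_congr_left
    (g := fun u => if key ∈ pvRS (report.map PySem.Str.split₀) u then (1 : Int) else 0)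
    (fun u _ => by
      rw [List.Nodup.count (show (pvRS (report.map PySem.Str.split₀) u).Nodup from by
        rw [pvRS]; exact PySem.Set.nodup_ofList _)]
      split <;> simp [*])]
  rw [PySem.List.sum_map_ite_one_zero'
    (p := fun u => key ∈ pvRS (report.map PySem.Str.split₀) u)]
  rw [List.countP_filter]

-- B's reporter-set comprehension collects exactly pvRS once every pair has two tokens
theorem pv_reporters_eq (P : List (List String)) (hP2 : ∀ w ∈ P, w.length = 2) (u : String) :
    pvReporters P u = pvRS P u := by
  rw [pvReporters, pvRS]
  congr 1
  induction P with
  | nil => rfl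
  | cons w P ih =>
    have h2 := pv_len2 w (hP2 w (by simp))
    rw [List.filterMap_cons, List.filter_cons]
    have hget1 : PySem.List.pyGet? w 1 = some (pvSnd w) := by
      rw [h2]; simp [PySem.List.pyGet?, PySem.List.pyIdx?, pvFst, pvSnd]
    have hget0 : PySem.List.pyGet? w 0 = some (pvFst w) := by
      rw [h2]; simp [PySem.List.pyGet?, PySem.List.pyIdx?, pvFst, pvSnd]
    rw [hget1, hget0]
    by_cases h : pvSnd w = u
    · simp only [h, beq_self_eq_true, if_pos, List.map_cons]
      rw [ih (fun w' hw' => hP2 w' (by simp [hw']))]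
    · simp only [beq_eq_false_iff_ne.2 h, Bool.false_eq_true, if_false]
      exact ih (fun w' hw' => hP2 w' (by simp [hw']))

-- B's closed form: identical to A's
theorem pv_alt_eq (id_list report : List String) (k : Int)
    (hPre : Pre_solution id_list report k) :
    solution_alt id_list report k
    = (PySem.Set.ofList id_list).map (fun key =>
        ((PySem.Set.ofList id_list).countP (fun u =>
            decide (key ∈ pvRS (report.map PySem.Str.split₀) u) &&
            decide (k ≤ ((pvRS (report.map PySem.Str.split₀) u).length : Int))) : Int)) := by
  have hP2 : ∀ w ∈ report.map PySem.Str.split₀, w.length = 2 := by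
    intro w hw; obtain ⟨s, hs, rfl⟩ := List.mem_map.1 hw; exact (hPre s hs).1
  have hrep : ∀ u, pvReporters (report.map PySem.Str.split₀) u
      = pvRS (report.map PySem.Str.split₀) u := pv_reporters_eq _ hP2
  rw [solution_alt, PySem.List.dedup_eq_ofList]
  refine List.map_congr_left (fun key _ => ?_)
  congr 1
  rw [List.countP_map, List.countP_filter]
  refine List.countP_congr (fun u _ => ?_)
  simp only [Function.comp_def, hrep]

-- ===== VERDICT =====
theorem solution_spec : Claim_equal_solution := by
  intro id_list report k _hDom hPre
  unfold Spec_solution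
  rw [pv_solution_eq id_list report k hPre, pv_alt_eq id_list report k hPre]
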